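-- pv_equiv track=rewrite | github.com/ludvikbrodl/adventofcode | 2021/07/main.py | calc_costs
-- ===== SOURCE A (Python) =====
-- from collections import defaultdict
--
-- def calc_costs(positions):
--     max_x = max(positions)
--     costs_dict: defaultdict[int, int] = defaultdict(int)
--     for x in range(max_x + 1):
--         for pos in positions:
--             dist = abs(pos - x)
--             costs_dict[x] += dist
--     return costs_dict
-- ===== SOURCE B (Python) =====
-- from collections import Counter, defaultdict
--
-- def calc_costs(positions):
--     max_x = max(positions)
--     n = len(positions)
--     freq = Counter(positions)
--     cost = sum(abs(p) for p in positions)   # = total distance to x = 0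
--     below = sum(1 for p in positions if p < 0)   # count of p <= x-1 for x = 0
--     res = defaultdict(int)
--     for x in range(max_x + 1):
--         res[x] = cost
--         below += freq[x]                    # now: count of p <= x
--         cost += 2 * below - n               # total distance to x+1
--     return res
-- ===== Notes on version B (the rewrite author's own statement) =====
-- stated objective: faster
-- what changed: A recomputes the sum of |pos - x| over all positions for every x in 0..max; B builds a Counter once and sweeps x upward, updating the running distance sum incrementally via cost += 2*(count of positions <= x) - n.
import Mathlib
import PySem

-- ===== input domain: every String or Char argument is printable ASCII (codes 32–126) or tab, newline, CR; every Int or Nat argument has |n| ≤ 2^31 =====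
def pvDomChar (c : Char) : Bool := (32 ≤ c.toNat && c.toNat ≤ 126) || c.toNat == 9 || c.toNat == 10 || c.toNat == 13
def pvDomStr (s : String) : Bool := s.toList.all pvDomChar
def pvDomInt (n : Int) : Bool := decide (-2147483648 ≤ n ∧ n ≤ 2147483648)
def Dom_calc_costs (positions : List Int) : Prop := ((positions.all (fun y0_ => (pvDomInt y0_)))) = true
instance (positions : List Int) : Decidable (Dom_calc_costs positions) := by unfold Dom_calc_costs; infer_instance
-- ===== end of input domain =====

-- B replaces A's O(max_x * n) rescan per target x by an O(n + max_x) sweep: a Counter of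
-- positions plus incremental updates of the running distance sum (objective: faster).

-- ===== PORT A =====
def calc_costs (positions : List Int) : List (Int × Int) :=
  match PySem.List.max? positions (fun p => p) with
  | none => []          -- max([]) raises ValueError; excluded by Pre_
  | some max_x =>
    ((PySem.List.pyRange 0 (max_x + 1)).foldl
      (fun (d : PySem.Dict Int Int) x =>
        positions.foldl (fun d pos => d.modify x 0 (· + |pos - x|)) d)
      PySem.Dict.empty).items

-- ===== PORT B =====
def calc_costs_alt (positions : List Int) : List (Int × Int) :=
  match PySem.List.max? positions (fun p => p) with
  | none => []          -- max([]) raises ValueError; excluded by Pre_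
  | some max_x =>
    let n : Int := positions.length
    let freq := PySem.Dict.counter positions
    let st :=
      (PySem.List.pyRange 0 (max_x + 1)).foldl
        (fun (st : PySem.Dict Int Int × Int × Int) x =>
          let res := st.1.insert x st.2.2
          let below := st.2.1 + freq.getD x 0
          (res, below, st.2.2 + 2 * below - n))
        (PySem.Dict.empty,
         ((positions.filter (fun p => p < 0)).length : Int),
         (positions.map (fun p => |p|)).sum)
    st.1.items

-- ===== PRECONDITION & SPEC =====
-- Pre_ excludes only the empty list, on which Python's max([]) raises ValueError.
def Pre_calc_costs (positions : List Int) : Prop := positions ≠ []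
instance (positions : List Int) : Decidable (Pre_calc_costs positions) := by unfold Pre_calc_costs; infer_instance
def pvWitness_calc_costs : List Int := [1, 0, 2]

def Spec_calc_costs (positions : List Int) (out : List (Int × Int)) : Prop := out = calc_costs_alt positions
instance (positions : List Int) (out : List (Int × Int)) : Decidable (Spec_calc_costs positions out) := by unfold Spec_calc_costs; infer_instance

-- ===== CLAIM (what is proved, stated in full; the proofs are below) =====
def Claim_equal_calc_costs : Prop := ∀ (positions : List Int), Dom_calc_costs positions → Pre_calc_costs positions → Spec_calc_costs positions (calc_costs positions)

-- ===== LEMMAS AND PROOFS =====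

-- the common value: total distance from all positions to target x
def pvS (positions : List Int) (x : Int) : Int := (positions.map (fun p => |p - x|)).sum

-- shifting the target by one changes the total distance by 2·#{p < x+1} − n
theorem pvS_succ (l : List Int) (x : Int) :
    pvS l (x + 1) = pvS l x + 2 * (l.countP (fun p => decide (p < x + 1)) : Int) - l.length := by
  induction l with
  | nil => simp [pvS]
  | cons p t ih =>
    simp only [pvS, List.map_cons, List.sum_cons, List.countP_cons, List.length_cons] at *
    rcases (by omega : p ≤ x ∨ x < p) with h | h
    · rw [abs_of_nonpos (by omega : p - (x + 1) ≤ 0), abs_of_nonpos (by omega : p - x ≤ 0)]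
      simp only [decide_eq_true_eq, if_pos (by omega : p < x + 1)]
      push_cast; omega
    · rw [abs_of_nonneg (by omega : 0 ≤ p - (x + 1)), abs_of_pos (by omega : 0 < p - x)]
      simp only [decide_eq_true_eq, if_neg (by omega : ¬ p < x + 1)]
      push_cast; omega

theorem pvCount_succ (l : List Int) (x : Int) :
    l.countP (fun p => decide (p < x + 1)) = l.countP (fun p => decide (p < x)) + l.count x := by
  induction l with
  | nil => simp
  | cons p t ih =>
    simp only [List.countP_cons, List.count_cons, ih]
    rcases eq_or_ne p x with rfl | h
    · simp; omega
    · simp only [decide_eq_true_eq, beq_iff_eq, h, if_false]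
      by_cases hp : p < x
      · rw [if_pos (by omega), if_pos hp]; omega
      · rw [if_neg (by omega), if_neg hp]; omega

-- A's inner loop over positions, once the key x is already present
theorem pvInnerA (x : Int) (l : List Int) (d : PySem.Dict Int Int) (v : Int) :
    l.foldl (fun d pos => d.modify x 0 (· + |pos - x|)) (d.insert x v)
      = d.insert x (v + (l.map (fun p => |p - x|)).sum) := by
  induction l generalizing v with
  | nil => simp
  | cons p t ih =>
    simp only [List.foldl_cons]
    have : (d.insert x v).modify x 0 (· + |p - x|) = d.insert x (v + |p - x|) := by
      show (d.insert x v).insert x ((d.insert x v).getD x 0 + |p - x|) = _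
      rw [PySem.Dict.getD_insert_self, PySem.Dict.insert_insert_self]
    rw [this, ih, List.map_cons, List.sum_cons, add_assoc]

-- the dict after processing targets 0..m-1 (A's side), for nonempty positions
theorem pvOuterA (positions : List Int) (hne : positions ≠ []) (m : Nat) :
    (PySem.List.pyRange 0 (m : Int)).foldl
      (fun (d : PySem.Dict Int Int) x =>
        positions.foldl (fun d pos => d.modify x 0 (· + |pos - x|)) d)
      PySem.Dict.empty
    = PySem.Dict.mk ((PySem.List.pyRange 0 (m : Int)).map (fun y => (y, pvS positions y))) := by
  induction m with
  | zero =>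
    simp only [Nat.cast_zero]
    rw [PySem.List.pyRange_one_eq_nil le_rfl]
    rfl
  | succ m ih =>
    have hsr : PySem.List.pyRange 0 ((m : Int) + 1)
        = PySem.List.pyRange 0 (m : Int) ++ [(m : Int)] :=
      PySem.List.pyRange_one_succ_right (by positivity)
    have hm1 : ((m + 1 : Nat) : Int) = (m : Int) + 1 := by push_cast; ring
    rw [hm1, hsr, List.foldl_append, ih, List.map_append]
    set d := PySem.Dict.mk ((PySem.List.pyRange 0 (m : Int)).map (fun y => (y, pvS positions y))) with hd
    have hnc : d.contains (m : Int) = false := by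
      rw [PySem.Dict.contains_eq_decide_mem_keys]
      simp only [decide_eq_false_iff_not, hd]
      intro hmem
      unfold PySem.Dict.keys at hmem
      simp only [List.map_map, List.mem_map] at hmem
      obtain ⟨y, hy, hye⟩ := hmem
      rw [PySem.List.mem_pyRange_one] at hy
      simp at hye; omega
    obtain ⟨p, t, rfl⟩ := List.exists_cons_of_ne_nil hne
    simp only [List.foldl_cons]
    have h1 : d.modify (m : Int) 0 (· + |p - (m : Int)|)
        = d.insert (m : Int) (0 + |p - (m : Int)|) := by
      show d.insert (m : Int) (d.getD (m : Int) 0 + |p - (m : Int)|) = _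
      rw [PySem.Dict.getD_of_not_contains d 0 hnc]
    rw [h1, pvInnerA, List.foldl_nil]
    apply PySem.Dict.ext
    rw [PySem.Dict.items_insert_of_not_contains d _ hnc]
    simp [pvS, hd]

-- the state after processing targets 0..m-1 (B's side)
theorem pvOuterB (positions : List Int) (m : Nat) :
    (PySem.List.pyRange 0 (m : Int)).foldl
      (fun (st : PySem.Dict Int Int × Int × Int) x =>
        let res := st.1.insert x st.2.2
        let below := st.2.1 + (PySem.Dict.counter positions).getD x 0
        (res, below, st.2.2 + 2 * below - (positions.length : Int)))
      (PySem.Dict.empty,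
       ((positions.filter (fun p => p < 0)).length : Int),
       (positions.map (fun p => |p|)).sum)
    = (PySem.Dict.mk ((PySem.List.pyRange 0 (m : Int)).map (fun y => (y, pvS positions y))),
       (positions.countP (fun p => decide (p < (m : Int))) : Int),
       pvS positions (m : Int)) := by
  induction m with
  | zero =>
    simp only [Nat.cast_zero]
    rw [PySem.List.pyRange_one_eq_nil le_rfl]
    simp only [List.foldl_nil, List.map_nil]
    refine Prod.ext rfl (Prod.ext ?_ ?_)
    · simp [List.countP_eq_length_filter]
    · simp [pvS]
  | succ m ih =>
    have hsr : PySem.List.pyRange 0 ((m : Int) + 1)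
        = PySem.List.pyRange 0 (m : Int) ++ [(m : Int)] :=
      PySem.List.pyRange_one_succ_right (by positivity)
    have hm1 : ((m + 1 : Nat) : Int) = (m : Int) + 1 := by push_cast; ring
    rw [hm1, hsr, List.foldl_append, ih]
    simp only [List.foldl_cons, List.foldl_nil]
    refine Prod.ext ?_ (Prod.ext ?_ ?_)
    · -- dict component
      apply PySem.Dict.ext
      have hnc : (PySem.Dict.mk ((PySem.List.pyRange 0 (m : Int)).map
          (fun y => (y, pvS positions y)))).contains (m : Int) = false := by
        rw [PySem.Dict.contains_eq_decide_mem_keys]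
        simp only [decide_eq_false_iff_not]
        intro hmem
        unfold PySem.Dict.keys at hmem
        simp only [List.map_map, List.mem_map] at hmem
        obtain ⟨y, hy, hye⟩ := hmem
        rw [PySem.List.mem_pyRange_one] at hy
        simp at hye; omega
      rw [PySem.Dict.items_insert_of_not_contains _ _ hnc]
      simp
    · -- below component
      rw [PySem.Dict.getD_counter, pvCount_succ]
      push_cast; ring
    · -- cost component
      rw [pvS_succ, pvCount_succ, PySem.Dict.getD_counter]
      push_cast; ring

-- ===== VERDICT (by name: the statement is the Claim_ definition above) =====
theorem calc_costs_spec : Claim_equal_calc_costs := by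
  intro positions _hdom hpre
  unfold Spec_calc_costs calc_costs calc_costs_alt
  cases hmax : PySem.List.max? positions (fun p => p) with
  | none => rfl
  | some max_x =>
    simp only
    rcases (by omega : max_x + 1 ≤ 0 ∨ 0 < max_x + 1) with hle | hpos
    · rw [PySem.List.pyRange_one_eq_nil hle]; rfl
    · have hm : max_x + 1 = ((max_x + 1).toNat : Int) := by omega
      rw [hm, pvOuterA positions hpre, pvOuterB positions]
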